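-- pv_equiv track=rewrite | github.com/anatshafir1/git_training | AmiRNAs/WMD3Parser.py | createSubgroupsTree
-- ===== SOURCE A (Python) =====
-- def createSubgroupsTree(lstOfSubgroups):
--     fatherSubgroups = {}
--     subgroupsTree = {}
--     setOfPossibleSons = []
--     for i in range(len(lstOfSubgroups)):
--         currNode = lstOfSubgroups[i]
--         subgroupsTree[tuple(sorted(list(currNode)))] = []
--         sons = []
--         for sonCandidate in setOfPossibleSons:
--             if sonCandidate.issubset(currNode):
--                 subgroupsTree[tuple(sorted(list(currNode)))].append(tuple(sorted(list(sonCandidate))))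
--                 fatherSubgroups[tuple(sorted(list(sonCandidate)))] = tuple(sorted(list(currNode)))
--                 sons.append(sonCandidate)
--         for son in sons:
--             setOfPossibleSons.remove(son)
--         setOfPossibleSons.append(currNode)
--         if i == len(lstOfSubgroups)-1:
--             fatherSubgroups[tuple(sorted(list(currNode)))] = None
--     return subgroupsTree, fatherSubgroups
-- ===== SOURCE B (Python) =====
-- def createSubgroupsTree(lstOfSubgroups):
--     nodes = list(lstOfSubgroups)
--     n = len(nodes)
--     keys = [tuple(sorted(node)) for node in nodes]
--     # father index: first later node that is a superset (None if no such node)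
--     fa = []
--     for i in range(n):
--         f = None
--         for j in range(i + 1, n):
--             if nodes[i].issubset(nodes[j]):
--                 f = j
--                 break
--         fa.append(f)
--     subgroupsTree = {}
--     fatherSubgroups = {}
--     for j in range(n):
--         kids = [keys[i] for i in range(j) if fa[i] == j]
--         subgroupsTree[keys[j]] = kids
--         for k in kids:
--             fatherSubgroups[k] = keys[j]
--     if n:
--         fatherSubgroups[keys[-1]] = None
--     return subgroupsTree, fatherSubgroups
-- ===== Notes on version B (the rewrite author's own statement) =====
-- stated objective: alternative
-- what changed: A maintains a mutable frontier list (setOfPossibleSons) it prunes in place; B instead computes, for every node i, the index of its first later superset in one forward scan, and then builds both dictionaries in a single indexed pass with no frontier state.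
import Mathlib
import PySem

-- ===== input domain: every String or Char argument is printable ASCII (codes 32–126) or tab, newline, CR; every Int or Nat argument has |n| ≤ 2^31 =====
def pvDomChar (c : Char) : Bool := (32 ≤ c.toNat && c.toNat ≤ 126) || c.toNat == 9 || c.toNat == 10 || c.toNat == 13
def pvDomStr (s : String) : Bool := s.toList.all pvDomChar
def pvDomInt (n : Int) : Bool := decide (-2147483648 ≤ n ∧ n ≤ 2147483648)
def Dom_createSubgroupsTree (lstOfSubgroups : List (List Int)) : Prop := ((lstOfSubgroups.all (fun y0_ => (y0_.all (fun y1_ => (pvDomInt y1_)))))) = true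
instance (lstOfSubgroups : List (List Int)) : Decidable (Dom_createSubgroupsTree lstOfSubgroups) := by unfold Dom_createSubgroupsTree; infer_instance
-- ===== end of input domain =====

-- B replaces A's mutable frontier list by a direct first-later-superset (father) scan and
-- then builds both dictionaries in one indexed pass; objective: alternative decomposition.
-- Inner `List Int` values represent Python sets (distinct elements); `svKey` is
-- `tuple(sorted(list(s)))`, shared by both ports.

-- ===== PORT A =====
-- tuple(sorted(list(s)))
def svKey (xs : List Int) : List Int := PySem.List.sorted (PySem.Set.ofList xs) (fun x => x) false

-- Loop body of A: state = (subgroupsTree, fatherSubgroups, setOfPossibleSons).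
-- `setOfPossibleSons` keeps the raw input lists; Python compares its set elements by
-- content, which `remove?`'s list equality reproduces here because every set-equal copy
-- of a removed candidate is itself a subset and hence also removed at the same step.
def svStepA (n : Int)
    (st : PySem.Dict (List Int) (List (List Int)) × PySem.Dict (List Int) (Option (List Int)) × List (List Int))
    (p : Int × List Int) :
    PySem.Dict (List Int) (List (List Int)) × PySem.Dict (List Int) (Option (List Int)) × List (List Int) :=
  let i := p.1
  let currNode := p.2
  let kc := svKey currNode
  let tree := st.1.insert kc []
  let inner := st.2.2.foldl
    (fun (acc : PySem.Dict (List Int) (List (List Int)) × PySem.Dict (List Int) (Option (List Int)) × List (List Int)) sonCandidate =>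
      if PySem.Set.issubset sonCandidate currNode then
        (acc.1.modify kc [] (· ++ [svKey sonCandidate]),
         acc.2.1.insert (svKey sonCandidate) (some kc),
         acc.2.2 ++ [sonCandidate])
      else acc)
    (tree, st.2.1, ([] : List (List Int)))
  let possible := inner.2.2.foldl (fun ps son => (PySem.List.remove? ps son).getD ps) st.2.2
  let possible := possible ++ [currNode]
  let fathers := if i == n - 1 then inner.2.1.insert kc none else inner.2.1
  (inner.1, fathers, possible)

def createSubgroupsTree (lstOfSubgroups : List (List Int)) : (List (List Int × List (List Int))) × (List (List Int × Option (List Int))) :=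
  let fin := (PySem.List.enumerate lstOfSubgroups).foldl (svStepA (lstOfSubgroups.length : Int))
    (PySem.Dict.empty, PySem.Dict.empty, ([] : List (List Int)))
  (fin.1.items, fin.2.1.items)

-- ===== PORT B =====
-- fa[i] = index of the first later superset of node i (the loop with break in Source B)
def svFa (L : List (List Int)) (i : Nat) : Option Nat :=
  (List.range' (i+1) (L.length - (i+1))).find? (fun j => PySem.Set.issubset (L.getD i []) (L.getD j []))

-- Loop body of B's second pass: at index j install the children list of node j and the
-- father entries of those children.
def svStepB (keys : List (List Int)) (fa : List (Option Nat))
    (st : PySem.Dict (List Int) (List (List Int)) × PySem.Dict (List Int) (Option (List Int)))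
    (j : Nat) :
    PySem.Dict (List Int) (List (List Int)) × PySem.Dict (List Int) (Option (List Int)) :=
  let kj := keys.getD j []
  let kids := ((List.range j).filter (fun i => fa.getD i none == some j)).map (fun i => keys.getD i [])
  (st.1.insert kj kids, kids.foldl (fun d ki => d.insert ki (some kj)) st.2)

def createSubgroupsTree_alt (lstOfSubgroups : List (List Int)) : (List (List Int × List (List Int))) × (List (List Int × Option (List Int))) :=
  let n := lstOfSubgroups.length
  let keys := lstOfSubgroups.map svKey
  let fa := (List.range n).map (fun i => svFa lstOfSubgroups i)
  let res := (List.range n).foldl (svStepB keys fa) (PySem.Dict.empty, PySem.Dict.empty)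
  let fathers := if n ≠ 0 then res.2.insert (keys.getD (n-1) []) none else res.2
  (res.1.items, fathers.items)

-- ===== PRECONDITION & SPEC =====
def Spec_createSubgroupsTree (lstOfSubgroups : List (List Int)) (out : (List (List Int × List (List Int))) × (List (List Int × Option (List Int)))) : Prop := out = createSubgroupsTree_alt lstOfSubgroups
instance (lstOfSubgroups : List (List Int)) (out : (List (List Int × List (List Int))) × (List (List Int × Option (List Int)))) : Decidable (Spec_createSubgroupsTree lstOfSubgroups out) := by unfold Spec_createSubgroupsTree; infer_instance

-- ===== CLAIM (what is proved, stated in full; the proofs are below) =====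
def Claim_equal_createSubgroupsTree : Prop := ∀ (lstOfSubgroups : List (List Int)), Dom_createSubgroupsTree lstOfSubgroups → Spec_createSubgroupsTree lstOfSubgroups (createSubgroupsTree lstOfSubgroups)

-- ===== LEMMAS AND PROOFS =====

-- Abbreviations used only by the proofs: raw node, key, subset test, "not yet claimed
-- before step m", children of j, and the two dictionaries after m steps of the loop.
def svRaw (L : List (List Int)) (i : Nat) : List Int := L.getD i []
def svK (L : List (List Int)) (i : Nat) : List Int := svKey (svRaw L i)
def svSub (L : List (List Int)) (i j : Nat) : Bool := PySem.Set.issubset (svRaw L i) (svRaw L j)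
def svNc (L : List (List Int)) (m i : Nat) : Bool := (List.range' (i+1) (m - (i+1))).all (fun j => !svSub L i j)
def svKids (L : List (List Int)) (j : Nat) : List (List Int) :=
  ((List.range j).filter (fun i => svFa L i == some j)).map (svK L)
def svT (L : List (List Int)) (m : Nat) : PySem.Dict (List Int) (List (List Int)) :=
  (List.range m).foldl (fun d j => d.insert (svK L j) (svKids L j)) PySem.Dict.empty
def svF (L : List (List Int)) (m : Nat) : PySem.Dict (List Int) (Option (List Int)) :=
  (List.range m).foldl (fun d j => (svKids L j).foldl (fun d ki => d.insert ki (some (svK L j))) d) PySem.Dict.empty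
def svP (L : List (List Int)) (m : Nat) : List (List Int) :=
  ((List.range m).filter (fun i => svNc L m i)).map (svRaw L)


theorem sv_innerFold (p : List (List Int)) (cur kc : List Int)
    (t : PySem.Dict (List Int) (List (List Int))) (fd : PySem.Dict (List Int) (Option (List Int))) (s0 : List (List Int)) :
    p.foldl
      (fun (acc : PySem.Dict (List Int) (List (List Int)) × PySem.Dict (List Int) (Option (List Int)) × List (List Int)) s =>
        if PySem.Set.issubset s cur then
          (acc.1.modify kc [] (· ++ [svKey s]), acc.2.1.insert (svKey s) (some kc), acc.2.2 ++ [s])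
        else acc)
      (t, fd, s0)
    = ((p.filter (fun s => PySem.Set.issubset s cur)).foldl (fun t s => t.modify kc [] (· ++ [svKey s])) t,
       (p.filter (fun s => PySem.Set.issubset s cur)).foldl (fun d s => d.insert (svKey s) (some kc)) fd,
       s0 ++ p.filter (fun s => PySem.Set.issubset s cur)) := by
  induction p generalizing t fd s0 with
  | nil => simp
  | cons x xs ih =>
    by_cases hx : PySem.Set.issubset x cur
    · simp only [List.foldl_cons, List.filter_cons, hx, if_pos, ih]
      simp
    · simp only [List.foldl_cons, List.filter_cons, hx, if_neg, ih]
      simp [hx]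

theorem sv_modify_insert {ν : Type} (d : PySem.Dict (List Int) ν) (k : List Int) (v : ν) (dflt : ν) (f : ν → ν) :
    (d.insert k v).modify k dflt f = d.insert k (f v) := by
  simp [PySem.Dict.modify, PySem.Dict.getD_insert_self, PySem.Dict.insert_insert_self]

theorem sv_modifyFold (l : List (List Int)) (d : PySem.Dict (List Int) (List (List Int))) (kc : List Int) (acc : List (List Int)) :
    l.foldl (fun t s => t.modify kc [] (· ++ [svKey s])) (d.insert kc acc) = d.insert kc (acc ++ l.map svKey) := by
  induction l generalizing acc with
  | nil => simp
  | cons x xs ih =>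
    rw [List.foldl_cons, sv_modify_insert, ih]
    simp

theorem sv_removeFold_aux (ys : List (List Int)) (x : List Int) (acc : List (List Int))
    (h : ∀ y ∈ ys, x ≠ y) :
    ys.foldl (fun ps son => (PySem.List.remove? ps son).getD ps) (x :: acc)
      = x :: ys.foldl (fun ps son => (PySem.List.remove? ps son).getD ps) acc := by
  induction ys generalizing acc with
  | nil => simp
  | cons y ys ih =>
    have hxy : x ≠ y := h y (by simp)
    simp only [List.foldl_cons]
    rw [PySem.List.remove?_cons_of_ne acc hxy]
    cases hr : PySem.List.remove? acc y with
    | none => simp [hr, ih _ (fun z hz => h z (by simp [hz]))]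
    | some r => simp [hr, ih _ (fun z hz => h z (by simp [hz]))]

theorem sv_removeFold (l : List (List Int)) (q : List Int → Bool) :
    (l.filter q).foldl (fun ps son => (PySem.List.remove? ps son).getD ps) l
      = l.filter (fun x => !q x) := by
  induction l with
  | nil => simp
  | cons x xs ih =>
    by_cases hx : q x
    · simp only [List.filter_cons, hx, if_pos]
      simp only [List.foldl_cons, PySem.List.remove?_cons_self, Option.getD_some]
      -- remaining: fold over (filter q xs) from xs
      simpa [hx] using ih
    · have hq : q x = false := by simpa using hx
      have hne : ∀ y ∈ xs.filter q, x ≠ y := by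
        intro y hy hxy
        rw [List.mem_filter] at hy
        subst hxy
        simp [hq] at hy
      rw [List.filter_cons_of_neg (by simp [hq]), List.filter_cons_of_pos (by simp [hq])]
      rw [sv_removeFold_aux _ _ _ hne, ih]

theorem sv_find?_range' (p : Nat → Bool) : ∀ (len a m : Nat),
    ((List.range' a len).find? p = some m ↔
      a ≤ m ∧ m < a + len ∧ p m = true ∧ ∀ j, a ≤ j → j < m → p j = false) := by
  intro len
  induction len with
  | zero => intro a m; simp; intros; omega
  | succ k ih =>
    intro a m
    rw [List.range'_succ, List.find?_cons]
    by_cases hp : p a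
    · simp only [hp, if_pos]
      constructor
      · intro h
        injection h with h
        subst h
        exact ⟨le_rfl, by omega, hp, fun j h1 h2 => absurd h1 (by omega)⟩
      · rintro ⟨h1, h2, h3, h4⟩
        by_cases ham : a = m
        · simp [ham]
        · exact absurd hp (by simp [h4 a le_rfl (lt_of_le_of_ne h1 ham)])
    · simp only [hp]
      rw [ih (a+1) m]
      constructor
      · rintro ⟨h1, h2, h3, h4⟩
        refine ⟨by omega, by omega, h3, ?_⟩
        intro j hj1 hj2
        rcases Nat.eq_or_lt_of_le hj1 with rfl | hlt
        · simpa using hp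
        · exact h4 j hlt hj2
      · rintro ⟨h1, h2, h3, h4⟩
        have ham : a ≠ m := by rintro rfl; simp [h3] at hp
        exact ⟨by omega, by omega, h3, fun j hj1 hj2 => h4 j (by omega) hj2⟩

theorem sv_nc_iff (L : List (List Int)) (m i : Nat) :
    svNc L m i = true ↔ ∀ j, i < j → j < m → svSub L i j = false := by
  unfold svNc
  rw [List.all_eq_true]
  constructor
  · intro h j h1 h2
    have hj : j ∈ List.range' (i+1) (m - (i+1)) := by
      rw [List.mem_range'_1]
      omega
    simpa using h j hj
  · intro h j hj
    rw [List.mem_range'_1] at hj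
    simp [h j (by omega) (by omega)]

theorem sv_bridge (L : List (List Int)) (m i : Nat) (him : i < m) (hmn : m < L.length) :
    (svNc L m i && svSub L i m) = (svFa L i == some m) := by
  have hiff : (svNc L m i = true ∧ svSub L i m = true) ↔ svFa L i = some m := by
    unfold svFa
    rw [sv_find?_range']
    constructor
    · rintro ⟨h1, h2⟩
      rw [sv_nc_iff] at h1
      exact ⟨by omega, by omega, h2, fun j hj1 hj2 => h1 j (by omega) hj2⟩
    · rintro ⟨h1, h2, h3, h4⟩
      refine ⟨?_, h3⟩
      rw [sv_nc_iff]
      intro j hj1 hj2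
      exact h4 j (by omega) (by omega)
  by_cases h : svFa L i = some m
  · rw [h, beq_self_eq_true]
    rw [Bool.and_eq_true]
    exact hiff.mpr h
  · rw [beq_eq_false_iff_ne.mpr h]
    rw [Bool.and_eq_false_iff]
    by_contra hc
    push_neg at hc
    exact h (hiff.mp ⟨by simpa using hc.1, by simpa using hc.2⟩)

theorem sv_getD_map {α β : Type} [Inhabited α] (f : α → β) (l : List α) (i : Nat) (d : β) (d' : α) (h : i < l.length) :
    (l.map f).getD i d = f (l.getD i d') := by
  rw [List.getD_eq_getElem?_getD, List.getD_eq_getElem?_getD, List.getElem?_map,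
    List.getElem?_eq_getElem h]
  simp

theorem sv_getD_map_range {α : Type} (f : Nat → α) (n i : Nat) (d : α) (h : i < n) :
    ((List.range n).map f).getD i d = f i := by
  rw [List.getD_eq_getElem?_getD, List.getElem?_map, List.getElem?_range h]
  simp

theorem sv_sons_eq (L : List (List Int)) (m : Nat) (hmn : m < L.length) :
    (svP L m).filter (fun s => PySem.Set.issubset s (L.getD m []))
      = ((List.range m).filter (fun i => svFa L i == some m)).map (svRaw L) := by
  unfold svP
  rw [List.filter_map, List.filter_filter]
  congr 1
  apply List.filter_congr
  intro i hi
  rw [List.mem_range] at hi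
  have : (PySem.Set.issubset (svRaw L i) (L.getD m [])) = svSub L i m := rfl
  simp only [Function.comp]
  rw [Bool.and_comm, this, sv_bridge L m i hi hmn]

theorem sv_P_succ (L : List (List Int)) (m : Nat) (hmn : m < L.length) :
    (svP L m).filter (fun s => !PySem.Set.issubset s (L.getD m [])) ++ [L.getD m []]
      = svP L (m+1) := by
  unfold svP
  rw [List.filter_map, List.filter_filter, List.range_succ, List.filter_append, List.map_append]
  congr 1
  · congr 1
    apply List.filter_congr
    intro i hi
    rw [List.mem_range] at hi
    have h1 : svNc L (m+1) i = (svNc L m i && !svSub L i m) := by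
      unfold svNc
      have hr : List.range' (i+1) (m+1 - (i+1)) = List.range' (i+1) (m - (i+1)) ++ [m] := by
        have h2 : m+1 - (i+1) = (m - (i+1)) + 1 := by omega
        rw [h2, List.range'_concat]
        congr 2
        omega
      rw [hr, List.all_append]
      simp
    rw [h1]
    simp only [Function.comp]
    rw [Bool.and_comm]
    rfl
  · have h2 : svNc L (m+1) m = true := by
      unfold svNc
      simp
    simp [h2, svRaw]

theorem sv_SA (L : List (List Int)) : ∀ m, m ≤ L.length →
    ((PySem.List.enumerate L).take m).foldl (svStepA (L.length : Int))
        (PySem.Dict.empty, PySem.Dict.empty, ([] : List (List Int)))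
      = (svT L m,
         (if m = L.length ∧ 0 < m then (svF L m).insert (svK L (m-1)) none else svF L m),
         svP L m) := by
  intro m
  induction m with
  | zero => intro _; simp [svT, svF, svP]
  | succ m ih =>
    intro hsm
    have hm : m < L.length := by omega
    have htake : (PySem.List.enumerate L).take (m+1)
        = (PySem.List.enumerate L).take m ++ [((m : Int), L[m])] := by
      rw [List.take_succ]
      congr 1
      rw [PySem.List.getElem?_enumerate]
      rw [List.getElem?_eq_getElem hm]
      simp
    rw [htake, List.foldl_append, ih (by omega)]
    rw [if_neg (by omega)]
    have hcur : L.getD m [] = L[m] := List.getD_eq_getElem L [] hm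
    show svStepA (L.length : Int)
        (svT L m, svF L m, svP L m) ((m : Int), L[m]) = _
    unfold svStepA
    simp only []
    rw [sv_innerFold]
    have hsons := sv_sons_eq L m hm
    rw [hcur] at hsons
    refine Prod.ext ?_ (Prod.ext ?_ ?_)
    · -- tree component
      show (List.foldl _ ((svT L m).insert (svKey L[m]) []) _) = svT L (m+1)
      rw [sv_modifyFold, hsons]
      unfold svT
      rw [List.range_succ, List.foldl_append]
      simp only [List.foldl_cons, List.foldl_nil, List.nil_append]
      congr 1
      · show svKey L[m] = svK L m
        rw [svK, svRaw, hcur]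
      · rw [List.map_map]
        rfl
    · -- fathers component
      show (if ((m : Int) == (L.length : Int) - 1) then _ else _) = _
      have hF : List.foldl (fun d s => d.insert (svKey s) (some (svKey L[m])))
          (svF L m) (List.filter (fun s => PySem.Set.issubset s L[m]) (svP L m))
          = svF L (m+1) := by
        rw [hsons]
        unfold svF
        rw [List.range_succ, List.foldl_append]
        simp only [List.foldl_cons, List.foldl_nil]
        rw [svKids, List.foldl_map, List.foldl_map]
        congr 1
        funext d i
        simp [svK, svRaw, List.getElem?_eq_getElem hm]
      by_cases hlast : m + 1 = L.length
      · rw [if_pos (by rw [beq_iff_eq]; omega)]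
        rw [if_pos ⟨hlast, by omega⟩]
        rw [hF]
        congr 1
        · simp [svK, svRaw, List.getElem?_eq_getElem hm]
      · rw [if_neg (by rw [beq_iff_eq]; omega)]
        rw [if_neg (by omega)]
        exact hF
    · -- possible component
      show List.foldl _ (svP L m) ([] ++ _) ++ [L[m]] = svP L (m+1)
      rw [List.nil_append]
      rw [← hcur]
      rw [sv_removeFold (svP L m) (fun s => PySem.Set.issubset s (L.getD m []))]
      exact sv_P_succ L m hm

theorem sv_keysD (L : List (List Int)) (i : Nat) (h : i < L.length) :
    (L.map svKey).getD i [] = svK L i := by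
  rw [sv_getD_map svKey L i [] [] h]
  rfl

theorem sv_B (L : List (List Int)) :
    createSubgroupsTree_alt L
      = ((svT L L.length).items,
         (if L.length = L.length ∧ 0 < L.length then (svF L L.length).insert (svK L (L.length-1)) none else svF L L.length).items) := by
  unfold createSubgroupsTree_alt
  simp only []
  have hstep : (List.range L.length).foldl (svStepB (L.map svKey) ((List.range L.length).map (fun i => svFa L i)))
      (PySem.Dict.empty, PySem.Dict.empty)
      = (svT L L.length, svF L L.length) := by
    rw [PySem.List.foldl_congr_mem _ _
      (fun st j => (st.1.insert (svK L j) (svKids L j),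
        (svKids L j).foldl (fun d ki => d.insert ki (some (svK L j))) st.2)) _ ?_]
    · unfold svT svF
      exact PySem.List.foldl_prod_mk
        (f := fun (d : PySem.Dict (List Int) (List (List Int))) (j : Nat) => d.insert (svK L j) (svKids L j))
        (g := fun (d : PySem.Dict (List Int) (Option (List Int))) (j : Nat) => (svKids L j).foldl (fun d ki => d.insert ki (some (svK L j))) d)
        (List.range L.length) PySem.Dict.empty PySem.Dict.empty
    · intro st j hj
      rw [List.mem_range] at hj
      unfold svStepB
      simp only []
      have hkids : ((List.range j).filter (fun i => ((List.range L.length).map (fun i => svFa L i)).getD i none == some j)).map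
            (fun i => (L.map svKey).getD i []) = svKids L j := by
        unfold svKids
        have h1 : (List.range j).filter (fun i => ((List.range L.length).map (fun i => svFa L i)).getD i none == some j)
            = (List.range j).filter (fun i => svFa L i == some j) := by
          apply List.filter_congr
          intro i hi
          rw [List.mem_range] at hi
          rw [sv_getD_map_range (fun i => svFa L i) L.length i none (by omega)]
        rw [h1]
        apply List.map_congr_left
        intro i hi
        rw [List.mem_filter, List.mem_range] at hi
        exact sv_keysD L i (by omega)
      rw [hkids, sv_keysD L j hj]
  rw [hstep]
  by_cases hn : L.length = 0
  · rw [if_neg (by omega), if_neg (by omega)]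
  · rw [if_pos (by omega), if_pos ⟨trivial, by omega⟩, sv_keysD L (L.length - 1) (by omega)]

-- ===== VERDICT (by name: the statement is the Claim_ definition above) =====
theorem createSubgroupsTree_spec : Claim_equal_createSubgroupsTree := by
  intro L _
  unfold Spec_createSubgroupsTree createSubgroupsTree
  rw [sv_B L]
  have h := sv_SA L L.length le_rfl
  rw [show (PySem.List.enumerate L).take L.length = PySem.List.enumerate L by
        rw [← PySem.List.length_enumerate (xs := L) (s := 0)]; exact List.take_length]
    at h
  simp only [h]
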